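-- pv_equiv track=rewrite | github.com/juyeonkwon/name-destiny | name_core.py | expand_reduction_steps
-- ===== SOURCE A (Python) =====
-- from typing import List, Tuple
--
-- def expand_reduction_steps(seq: List[int]) -> List[List[int]]:
--     """인접 합을 1의 자리로 줄여 길이 2가 될 때까지 반복."""
--     if not seq or len(seq) < 2:
--         return [list(seq)] if seq else []
--     steps: List[List[int]] = [list(seq)]
--     cur = steps[0]
--     while len(cur) > 2:
--         cur = [ (cur[i] + cur[i+1]) % 10 for i in range(len(cur)-1) ]
--         steps.append(cur)
--     return steps
-- ===== SOURCE B (Python) =====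
-- from typing import List
--
-- def expand_reduction_steps(seq: List[int]) -> List[List[int]]:
--     """인접 합을 1의 자리로 줄여 길이 2가 될 때까지 반복."""
--     if not seq or len(seq) < 2:
--         return [list(seq)] if seq else []
--     n = len(seq)
--     steps: List[List[int]] = [list(seq)]
--     coeffs = [1]
--     for d in range(1, n - 1):
--         coeffs = [1] + [coeffs[j] + coeffs[j + 1] for j in range(len(coeffs) - 1)] + [1]
--         steps.append([sum(coeffs[k] * seq[i + k] for k in range(len(coeffs))) % 10
--                       for i in range(n - d)])
--     return steps
-- ===== Notes on version B (the rewrite author's own statement) =====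
-- stated objective: alternative
-- what changed: Instead of repeatedly folding the previous row, each row d is computed directly from the original sequence via iteratively built binomial (Pascal) coefficients: row_d[i] = (sum_k C(d,k)*seq[i+k]) % 10.
import Mathlib
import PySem

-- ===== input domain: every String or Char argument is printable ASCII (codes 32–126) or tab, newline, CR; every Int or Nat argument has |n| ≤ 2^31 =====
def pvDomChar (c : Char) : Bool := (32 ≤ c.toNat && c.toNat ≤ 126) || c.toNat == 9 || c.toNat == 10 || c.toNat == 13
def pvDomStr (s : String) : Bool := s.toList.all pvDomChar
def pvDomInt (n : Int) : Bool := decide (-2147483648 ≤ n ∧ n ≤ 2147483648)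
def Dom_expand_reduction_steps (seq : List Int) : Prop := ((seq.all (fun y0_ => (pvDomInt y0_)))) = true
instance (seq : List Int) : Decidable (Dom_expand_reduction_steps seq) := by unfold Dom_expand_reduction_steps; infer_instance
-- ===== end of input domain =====

-- B computes each row directly from the original sequence with Pascal-triangle coefficients
-- instead of deriving it from the previous row (alternative decomposition, same output).

-- ===== PORT A =====
-- one pass of the while-loop body: [(cur[i]+cur[i+1]) % 10 for i in range(len(cur)-1)]
-- (indices i, i+1 are always in range, so getD is exact)
def aStep (cur : List Int) : List Int :=
  (List.range (cur.length - 1)).map (fun i => PySem.Int.mod (cur.getD i 0 + cur.getD (i+1) 0) 10)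

-- the while-loop: terminates because each step shortens cur by one
def aLoop (steps : List (List Int)) (cur : List Int) : List (List Int) :=
  if cur.length > 2 then
    aLoop (steps ++ [aStep cur]) (aStep cur)
  else steps
termination_by cur.length
decreasing_by simp [aStep]; omega

def expand_reduction_steps (seq : List Int) : List (List Int) :=
  if seq = [] ∨ seq.length < 2 then (if seq ≠ [] then [seq] else [])
  else aLoop [seq] seq

-- ===== PORT B =====
-- coeffs = [1] + [coeffs[j] + coeffs[j+1] for j in range(len(coeffs)-1)] + [1]
def nextCoeffs (cs : List Int) : List Int :=
  1 :: (((List.range (cs.length - 1)).map (fun j => cs.getD j 0 + cs.getD (j+1) 0)) ++ [1])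

-- [sum(coeffs[k]*seq[i+k] for k in range(len(coeffs))) % 10 for i in range(n-d)]
-- (all indices are in range, so getD is exact)
def bRow (seq cs : List Int) (n d : Nat) : List Int :=
  (List.range (n - d)).map (fun i =>
    PySem.Int.mod (((List.range cs.length).map (fun k => cs.getD k 0 * seq.getD (i+k) 0)).sum) 10)

def expand_reduction_steps_alt (seq : List Int) : List (List Int) :=
  if seq = [] ∨ seq.length < 2 then (if seq ≠ [] then [seq] else [])
  else
    ((List.range' 1 (seq.length - 2)).foldl
      (fun st d =>
        (st.1 ++ [bRow seq (nextCoeffs st.2) seq.length d], nextCoeffs st.2))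
      ([seq], [1])).1

-- ===== PRECONDITION & SPEC =====
def Spec_expand_reduction_steps (seq : List Int) (out : List (List Int)) : Prop := out = expand_reduction_steps_alt seq
instance (seq : List Int) (out : List (List Int)) : Decidable (Spec_expand_reduction_steps seq out) := by unfold Spec_expand_reduction_steps; infer_instance

-- ===== CLAIM (what is proved, stated in full; the proofs are below) =====
def Claim_equal_expand_reduction_steps : Prop := ∀ (seq : List Int), Dom_expand_reduction_steps seq → Spec_expand_reduction_steps seq (expand_reduction_steps seq)

-- ===== LEMMAS AND PROOFS =====

-- proof-side model: S seq d i = Σ_{k≤d} C(d,k)·seq[i+k]; brow seq d = the d-th row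
def S (seq : List Int) (d i : Nat) : Int :=
  ∑ k ∈ Finset.range (d+1), (d.choose k : Int) * seq.getD (i+k) 0

def brow (seq : List Int) (d : Nat) : List Int :=
  if d = 0 then seq
  else (List.range (seq.length - d)).map (fun i => (S seq d i) % 10)

def binCoeffs (d : Nat) : List Int := (List.range (d+1)).map (fun k => (d.choose k : Int))

lemma getD_map_range {f : Nat → Int} {m i : Nat} (h : i < m) :
    ((List.range m).map f).getD i 0 = f i := by
  rw [List.getD_eq_getElem?_getD]
  simp [List.getElem?_map, List.getElem?_range, h]

lemma sum_map_range (f : Nat → Int) (m : Nat) :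
    ((List.range m).map f).sum = ∑ k ∈ Finset.range m, f k := by
  induction m with
  | zero => simp
  | succ m ih => rw [List.range_succ, Finset.sum_range_succ]; simp [ih]

lemma S_pascal (seq : List Int) (d i : Nat) :
    S seq (d+1) i = S seq d i + S seq d (i+1) := by
  unfold S
  rw [Finset.sum_range_succ']
  have h1 : ∀ k ∈ Finset.range (d+1),
      ((d+1).choose (k+1) : Int) * seq.getD (i+(k+1)) 0
      = (d.choose k : Int) * seq.getD (i+1+k) 0 + (d.choose (k+1) : Int) * seq.getD (i+(k+1)) 0 := by
    intro k _
    have : (d+1).choose (k+1) = d.choose k + d.choose (k+1) := Nat.choose_succ_succ d k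
    have harg : i + (k+1) = i + 1 + k := by omega
    rw [this, harg]; push_cast; ring
  rw [Finset.sum_congr rfl h1, Finset.sum_add_distrib]
  have h3 : ∑ k ∈ Finset.range (d+1), (d.choose (k+1) : Int) * seq.getD (i+(k+1)) 0
      = ∑ k ∈ Finset.range d, (d.choose (k+1) : Int) * seq.getD (i+(k+1)) 0 := by
    rw [Finset.sum_range_succ]; simp [Nat.choose_succ_self]
  rw [h3]
  have h2 : ∑ k ∈ Finset.range (d+1), (d.choose k : Int) * seq.getD (i+k) 0
      = ∑ k ∈ Finset.range d, (d.choose (k+1) : Int) * seq.getD (i+(k+1)) 0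
        + (d.choose 0 : Int) * seq.getD (i+0) 0 := Finset.sum_range_succ' _ _
  rw [h2]
  simp only [Nat.choose_zero_right, Nat.cast_one]
  ring

lemma brow_length (seq : List Int) (d : Nat) (hd : d ≤ seq.length) :
    (brow seq d).length = seq.length - d := by
  unfold brow; split <;> simp_all

lemma pymod10 (x : Int) : PySem.Int.mod x 10 = x % 10 :=
  PySem.Int.mod_eq_emod_of_pos (by norm_num)

lemma aStep_brow (seq : List Int) (d : Nat) (hd : d + 1 ≤ seq.length) :
    aStep (brow seq d) = brow seq (d+1) := by
  rcases Nat.eq_zero_or_pos d with hd0 | hd0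
  · subst hd0
    unfold aStep brow
    simp only [if_pos rfl, if_neg (Nat.one_ne_zero)]
    apply List.map_congr_left
    intro i hi
    rw [pymod10]
    congr 1
    unfold S
    rw [Finset.sum_range_succ, Finset.sum_range_succ]
    simp
  · have hne : d ≠ 0 := Nat.pos_iff_ne_zero.mp hd0
    have hne1 : d + 1 ≠ 0 := by omega
    unfold aStep brow
    simp only [if_neg hne, if_neg hne1, List.length_map, List.length_range]
    have hlen : seq.length - d - 1 = seq.length - (d+1) := by omega
    rw [hlen]
    apply List.map_congr_left
    intro i hi
    rw [List.mem_range] at hi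
    rw [getD_map_range (by omega), getD_map_range (by omega), pymod10]
    conv_rhs => rw [S_pascal, Int.add_emod]

lemma binCoeffs_length (d : Nat) : (binCoeffs d).length = d + 1 := by
  simp [binCoeffs]

lemma nextCoeffs_bin (d : Nat) : nextCoeffs (binCoeffs d) = binCoeffs (d+1) := by
  unfold nextCoeffs
  rw [binCoeffs_length]
  have h1 : (List.range ((d+1) - 1)).map (fun j => (binCoeffs d).getD j 0 + (binCoeffs d).getD (j+1) 0)
      = (List.range d).map (fun j => ((d+1).choose (j+1) : Int)) := by
    simp only [Nat.add_sub_cancel]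
    apply List.map_congr_left
    intro j hj
    rw [List.mem_range] at hj
    unfold binCoeffs
    rw [getD_map_range (by omega), getD_map_range (by omega)]
    rw [Nat.choose_succ_succ]
    push_cast; ring
  rw [h1]
  unfold binCoeffs
  rw [List.range_succ_eq_map]
  simp only [List.map_cons, List.map_map, Nat.choose_zero_right, Nat.cast_one]
  congr 1
  rw [List.range_succ]
  simp [Function.comp, Nat.choose_self]

lemma bRow_brow (seq : List Int) (d : Nat) :
    bRow seq (binCoeffs (d+1)) seq.length (d+1) = brow seq (d+1) := by
  unfold bRow brow
  rw [if_neg (by omega : d + 1 ≠ 0), binCoeffs_length]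
  apply List.map_congr_left
  intro i hi
  rw [pymod10]
  congr 1
  rw [sum_map_range]
  unfold S
  apply Finset.sum_congr rfl
  intro k hk
  rw [List.mem_range] at hi
  rw [Finset.mem_range] at hk
  unfold binCoeffs
  rw [getD_map_range (by omega)]

lemma aLoop_invariant (seq : List Int) : ∀ m d, d + m + 2 = seq.length →
    aLoop ((List.range (d+1)).map (brow seq)) (brow seq d)
      = (List.range (seq.length - 1)).map (brow seq) := by
  intro m
  induction m with
  | zero =>
    intro d hd
    rw [aLoop]
    have hlen : (brow seq d).length = 2 := by
      rw [brow_length seq d (by omega)]; omega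
    rw [if_neg (by omega)]
    have : d + 1 = seq.length - 1 := by omega
    rw [this]
  | succ m ih =>
    intro d hd
    rw [aLoop]
    have hlen : (brow seq d).length = seq.length - d := brow_length seq d (by omega)
    rw [if_pos (by omega)]
    rw [aStep_brow seq d (by omega)]
    have hr : (List.range (d+1)).map (brow seq) ++ [brow seq (d+1)]
        = (List.range (d+2)).map (brow seq) := by
      rw [show d + 2 = (d+1) + 1 from rfl]
      conv_rhs => rw [List.range_succ]
      rw [List.map_append, List.map_cons, List.map_nil]
    rw [hr]
    exact ih (d+1) (by omega)

lemma bFold (seq : List Int) : ∀ m d,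
    (List.range' (d+1) m).foldl
      (fun st x => (st.1 ++ [bRow seq (nextCoeffs st.2) seq.length x], nextCoeffs st.2))
      ((List.range (d+1)).map (brow seq), binCoeffs d)
    = ((List.range (d+1+m)).map (brow seq), binCoeffs (d+m)) := by
  intro m
  induction m with
  | zero => intro d; simp
  | succ m ih =>
    intro d
    rw [List.range'_succ, List.foldl_cons]
    simp only [nextCoeffs_bin, bRow_brow]
    have hr : (List.range (d+1)).map (brow seq) ++ [brow seq (d+1)]
        = (List.range (d+1+1)).map (brow seq) := by
      conv_rhs => rw [List.range_succ]
      rw [List.map_append, List.map_cons, List.map_nil]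
    rw [hr]
    have := ih (d+1)
    rw [show d + 1 + 1 + m = d + 1 + (m + 1) by omega] at this
    rw [show d + 1 + m = d + (m + 1) by omega] at this
    exact this

-- ===== VERDICT (by name: the statement is the Claim_ definition above) =====
theorem expand_reduction_steps_spec : Claim_equal_expand_reduction_steps := by
  unfold Claim_equal_expand_reduction_steps
  intro seq _
  unfold Spec_expand_reduction_steps expand_reduction_steps expand_reduction_steps_alt
  by_cases h : seq = [] ∨ seq.length < 2
  · rw [if_pos h, if_pos h]
  · rw [if_neg h, if_neg h]
    push_neg at h
    obtain ⟨hne, hlen⟩ := h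
    have hstart : (([seq], ([1] : List Int)) : List (List Int) × List Int)
        = ((List.range (0+1)).map (brow seq), binCoeffs 0) := by
      simp [brow, binCoeffs]
    rw [hstart]
    have hf := bFold seq (seq.length - 2) 0
    rw [hf]
    have hA : aLoop [seq] seq = aLoop ((List.range (0+1)).map (brow seq)) (brow seq 0) := by
      simp [brow]
    rw [hA, aLoop_invariant seq (seq.length - 2) 0 (by omega)]
    have : 0 + 1 + (seq.length - 2) = seq.length - 1 := by omega
    rw [this]
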